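-- pv_equiv track=rewrite | github.com/NEVTIK-org/Simple-Virtual-Assistant | data/brain.py | symbols_remover
-- ===== SOURCE A (Python) =====
-- def symbols_remover(string):
-- 	symbols = ["/","?",":","*","|","<",">",'"']
-- 	new_input = []
-- 	for char in string:
-- 		if char in symbols:
-- 			continue
-- 		new_input.append(char)
-- 	return ''.join(new_input)
-- ===== SOURCE B (Python) =====
-- def symbols_remover(string):
-- 	for symbol in '/?:*|<>"':
-- 		string = string.replace(symbol, '')
-- 	return string
-- ===== Notes on version B (the rewrite author's own statement) =====
-- stated objective: alternative
-- what changed: Instead of A's single pass over the characters with a per-character membership test and append, B makes one whole-string str.replace deletion pass per forbidden symbol (8 staged passes), never testing membership per character.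
import Mathlib
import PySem

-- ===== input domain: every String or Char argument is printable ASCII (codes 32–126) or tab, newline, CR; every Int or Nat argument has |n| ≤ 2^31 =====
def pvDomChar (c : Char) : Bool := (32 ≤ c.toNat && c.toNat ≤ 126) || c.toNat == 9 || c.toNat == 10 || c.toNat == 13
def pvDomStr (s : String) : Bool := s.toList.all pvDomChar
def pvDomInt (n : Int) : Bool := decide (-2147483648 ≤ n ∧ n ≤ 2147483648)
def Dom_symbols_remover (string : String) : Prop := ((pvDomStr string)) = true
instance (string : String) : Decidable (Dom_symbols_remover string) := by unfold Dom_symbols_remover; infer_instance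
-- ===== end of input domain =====

-- B makes one whole-string deletion pass per forbidden symbol instead of A's per-character membership loop.

-- ===== PORT A =====
-- A: loop over chars, skip the char if it is in the symbols list, append otherwise, join.
def symbols_remover (string : String) : String :=
  let symbols : List Char := ['/', '?', ':', '*', '|', '<', '>', '"']
  let new_input : List Char :=
    string.toList.foldl (fun acc char => if char ∈ symbols then acc else acc ++ [char]) []
  String.ofList new_input

-- ===== PORT B =====
-- B: for each forbidden symbol, one string.replace(symbol, '') pass over the whole string.
def symbols_remover_alt (string : String) : String :=
  ((['/', '?', ':', '*', '|', '<', '>', '"'].map (fun c => String.ofList [c]))).foldl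
    (fun s symbol => PySem.Str.replace s symbol "") string

-- ===== PRECONDITION & SPEC =====
def Spec_symbols_remover (string : String) (out : String) : Prop := out = symbols_remover_alt string
instance (string : String) (out : String) : Decidable (Spec_symbols_remover string out) := by unfold Spec_symbols_remover; infer_instance

-- ===== CLAIM (what is proved, stated in full; the proofs are below) =====
def Claim_equal_symbols_remover : Prop := ∀ (string : String), Dom_symbols_remover string → Spec_symbols_remover string (symbols_remover string)

-- ===== LEMMAS AND PROOFS =====

-- replace.go with a single-char pattern and empty replacement is a filter (given enough fuel)
theorem pv_go_filter (c : Char) : ∀ (fuel : Nat) (l acc : List Char), l.length ≤ fuel →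
    PySem.Chars.replace.go [c] [] fuel l acc = acc.reverse ++ l.filter (fun x => x != c) := by
  intro fuel
  induction fuel with
  | zero =>
    intro l acc h
    have : l = [] := List.eq_nil_of_length_eq_zero (Nat.le_zero.mp h)
    subst this
    simp [PySem.Chars.replace.go]
  | succ n ih =>
    intro l acc h
    cases l with
    | nil => simp [PySem.Chars.replace.go]
    | cons a t =>
      simp only [PySem.Chars.replace.go]
      by_cases hc : a = c
      · subst hc
        simp only [List.isPrefixOf, beq_self_eq_true, Bool.true_and]
        rw [if_pos (by simp [List.isPrefixOf])]
        simp only [List.length, List.drop, List.reverse_nil, List.nil_append]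
        rw [ih t acc (by simpa using Nat.lt_succ_iff.mp (by simpa using h))]
        simp
      · rw [if_neg (by simp [List.isPrefixOf]; exact fun h => hc h.symm)]
        rw [ih t (a :: acc) (by simpa using Nat.lt_succ_iff.mp (by simpa using h))]
        simp [hc]

-- replace with a single-char pattern and empty replacement = filter out that char
theorem pv_replace_single (l : List Char) (c : Char) :
    PySem.Chars.replace l [c] [] = l.filter (fun x => x != c) := by
  unfold PySem.Chars.replace
  rw [if_neg (by simp)]
  rw [pv_go_filter c l.length l [] le_rfl]
  simp

-- A's foldl is a filter against the symbol list
theorem pv_foldl_filter (l acc : List Char) :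
    l.foldl (fun acc char => if char ∈ ['/', '?', ':', '*', '|', '<', '>', '"'] then acc else acc ++ [char]) acc
      = acc ++ l.filter (fun c => !(c ∈ ['/', '?', ':', '*', '|', '<', '>', '"'] : Bool)) := by
  induction l generalizing acc with
  | nil => simp
  | cons a t ih =>
    simp only [List.foldl_cons, List.filter_cons, ih]
    by_cases h : a ∈ ['/', '?', ':', '*', '|', '<', '>', '"'] <;> simp [h]

set_option maxHeartbeats 1000000 in
theorem pv_alt_toList (s : String) :
    (symbols_remover_alt s).toList
      = s.toList.filter (fun c => !(c ∈ ['/', '?', ':', '*', '|', '<', '>', '"'] : Bool)) := by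
  have e : ∀ (t : String) (c : Char),
      (PySem.Str.replace t (String.ofList [c]) "").toList = t.toList.filter (fun x => x != c) := by
    intro t c
    rw [PySem.Str.toList_replace,
        show (String.ofList [c]).toList = [c] by simp,
        show ("" : String).toList = [] from rfl, pv_replace_single]
  unfold symbols_remover_alt
  simp only [List.map_cons, List.map_nil, List.foldl_cons, List.foldl_nil, e, List.filter_filter]
  apply List.filter_congr
  intro a _
  by_cases h : a ∈ ['/', '?', ':', '*', '|', '<', '>', '"'] <;>
    simp_all [List.mem_cons] <;> tauto

theorem symbols_remover_spec : Claim_equal_symbols_remover := by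
  intro s _
  show String.ofList (s.toList.foldl
      (fun acc char => if char ∈ ['/', '?', ':', '*', '|', '<', '>', '"'] then acc else acc ++ [char]) [])
    = symbols_remover_alt s
  rw [pv_foldl_filter, List.nil_append, ← pv_alt_toList, String.ofList_toList]
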